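-- pv_equiv track=rewrite | github.com/HovhannesManushyan/HPMACS | crypt_utils.py | paternify
-- ===== SOURCE A (Python) =====
-- def paternify(instr):
--     """
--     Generates a pattern string for the input word. Each unique letter is assigned
--     a unique lowercase letter starting from 'a'.
--
--     Parameters:
--     - instr (str): The input word.
--
--     Returns:
--     - pattern (str): The pattern string.
--     """
--     ht = dict()
--     pattern = ""
--     cnt = 97  # ASCII value for 'a'
--     for i in instr.lower():
--         if i in ht:
--             pattern += ht[i]
--         else:
--             pattern += chr(cnt)
--             ht[i] = chr(cnt)
--             cnt += 1
--     return pattern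
-- ===== SOURCE B (Python) =====
-- def paternify(instr):
--     low = instr.lower()
--     # the pattern letter for c is determined by how many distinct letters
--     # occur strictly before c's first occurrence -- no mapping table needed
--     return "".join(chr(97 + len(set(low[:low.index(c)]))) for c in low)
-- ===== Notes on version B (the rewrite author's own statement) =====
-- stated objective: alternative
-- what changed: Drops the dict/counter state entirely: each output character is computed by a closed per-character formula chr(97 + len(set(low[:low.index(c)]))) -- the number of distinct letters before c's first occurrence -- instead of A's single stateful pass that threads a dict and a running counter.
import Mathlib
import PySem

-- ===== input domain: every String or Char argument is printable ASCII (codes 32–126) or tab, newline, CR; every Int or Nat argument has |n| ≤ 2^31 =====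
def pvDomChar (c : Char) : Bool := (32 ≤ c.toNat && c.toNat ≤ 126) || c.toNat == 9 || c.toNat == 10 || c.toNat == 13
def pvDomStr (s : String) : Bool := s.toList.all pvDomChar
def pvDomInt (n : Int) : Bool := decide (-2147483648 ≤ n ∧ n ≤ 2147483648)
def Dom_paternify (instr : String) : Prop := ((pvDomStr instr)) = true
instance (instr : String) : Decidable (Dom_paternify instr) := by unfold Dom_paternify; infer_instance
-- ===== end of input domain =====

-- B drops A's dict-and-counter state: each pattern letter is a closed per-character formula
-- (97 + number of distinct letters before the first occurrence); alternative algorithm, not faster.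

-- ===== PORT A =====
-- one loop step: the dict of seen letters, the pattern built so far (as chars), and the counter
def paternifyStep (st : PySem.Dict Char Char × List Char × Nat) (i : Char) :
    PySem.Dict Char Char × List Char × Nat :=
  match st with
  | (ht, pattern, cnt) =>
    match ht.get? i with
    | some v => (ht, pattern ++ [v], cnt)                                   -- pattern += ht[i]
    | none   => (ht.insert i (Char.ofNat cnt), pattern ++ [Char.ofNat cnt], cnt + 1)
      -- pattern += chr(cnt); ht[i] = chr(cnt); cnt += 1  (Char.ofNat = chr, exact for the codes reachable from Dom)

def paternify (instr : String) : String :=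
  String.ofList (((PySem.Chars.lower instr.toList).foldl paternifyStep (PySem.Dict.empty, [], 97)).2.1)

-- ===== PORT B =====
def paternify_alt (instr : String) : String :=
  let low := PySem.Chars.lower instr.toList
  -- chr(97 + len(set(low[:low.index(c)]))) for each c in low;
  -- low.index(c) never raises (c ∈ low), so the .getD 0 default is unreachable
  String.ofList (low.map (fun c =>
    Char.ofNat (97 + (PySem.Set.ofList
      (PySem.List.slice low none (some (((PySem.List.index? low c).getD 0 : Nat) : Int)))).length)))

-- ===== PRECONDITION & SPEC =====
def Spec_paternify (instr : String) (out : String) : Prop := out = paternify_alt instr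
instance (instr : String) (out : String) : Decidable (Spec_paternify instr out) := by unfold Spec_paternify; infer_instance

-- ===== CLAIM (what is proved, stated in full; the proofs are below) =====
def Claim_equal_paternify : Prop := ∀ (instr : String), Dom_paternify instr → Spec_paternify instr (paternify instr)

-- ===== LEMMAS AND PROOFS =====

-- the letter assigned to c, given the first-occurrence list u of unique letters
def patIdx (u : List Char) (c : Char) : Char := Char.ofNat (97 + ((PySem.List.index? u c).getD 0))

lemma get?_mk_map (u : List Char) (f : Char → Char) (c : Char) (h : c ∈ u) :
    (PySem.Dict.mk (u.map (fun x => (x, f x)))).get? c = some (f c) := by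
  induction u with
  | nil => cases h
  | cons a t ih =>
    simp only [List.map_cons, PySem.Dict.get?_mk_cons]
    by_cases hac : a = c
    · simp [hac]
    · simp only [beq_iff_eq, hac, if_false]
      exact ih (by cases h with | head => exact absurd rfl hac | tail _ h => exact h)

lemma get?_mk_map_none (u : List Char) (f : Char → Char) (c : Char) (h : c ∉ u) :
    (PySem.Dict.mk (u.map (fun x => (x, f x)))).get? c = none := by
  induction u with
  | nil => rfl
  | cons a t ih =>
    simp only [List.map_cons, PySem.Dict.get?_mk_cons]
    have hac : ¬ a = c := fun e => h (e ▸ List.mem_cons_self)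
    simp only [beq_iff_eq, hac, if_false]
    exact ih (fun hm => h (List.mem_cons_of_mem _ hm))

-- A's loop invariant: after processing p, the dict tabulates the unique letters of p,
-- the pattern is p mapped through that table, and the counter counts the unique letters.
lemma foldA (p : List Char) :
    p.foldl paternifyStep (PySem.Dict.empty, [], 97)
      = (PySem.Dict.mk ((PySem.Set.ofList p).map (fun c => (c, patIdx (PySem.Set.ofList p) c))),
         p.map (fun c => patIdx (PySem.Set.ofList p) c),
         97 + (PySem.Set.ofList p).length) := by
  induction p using List.reverseRecOn with
  | nil => rfl
  | append_singleton p i ih =>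
    rw [List.foldl_append, List.foldl_cons, List.foldl_nil, ih,
        PySem.Set.ofList_append_singleton]
    by_cases hi : i ∈ PySem.Set.ofList p
    · rw [PySem.Set.add_of_mem hi]
      simp only [paternifyStep, get?_mk_map _ _ _ hi, List.map_append, List.map_cons, List.map_nil]
    · rw [PySem.Set.add_of_not_mem hi]
      simp only [paternifyStep, get?_mk_map_none _ _ _ hi]
      have hidx : PySem.List.index? (PySem.Set.ofList p ++ [i]) i
          = some (PySem.Set.ofList p).length := PySem.List.index?_append_singleton_self _ _ hi
      have hsame : ∀ c ∈ PySem.Set.ofList p,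
          patIdx (PySem.Set.ofList p ++ [i]) c = patIdx (PySem.Set.ofList p) c := by
        intro c hc
        unfold patIdx
        rw [PySem.List.index?_append_of_mem _ hc]
      have hsame' : ∀ c ∈ p,
          patIdx (PySem.Set.ofList p ++ [i]) c = patIdx (PySem.Set.ofList p) c := by
        intro c hc; exact hsame c ((PySem.Set.mem_ofList _ _).2 hc)
      have hnew : patIdx (PySem.Set.ofList p ++ [i]) i
          = Char.ofNat (97 + (PySem.Set.ofList p).length) := by
        unfold patIdx; rw [hidx]; rfl
      have hcont : (PySem.Dict.mk ((PySem.Set.ofList p).map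
          (fun c => (c, patIdx (PySem.Set.ofList p) c)))).contains i = false := by
        rw [PySem.Dict.contains_eq_isSome_get?, get?_mk_map_none _ _ _ hi]; rfl
      refine Prod.ext ?_ (Prod.ext ?_ ?_)
      · apply PySem.Dict.ext
        rw [PySem.Dict.items_insert_of_not_contains _ _ hcont]
        show ((PySem.Set.ofList p).map (fun c => (c, patIdx (PySem.Set.ofList p) c)))
            ++ [(i, Char.ofNat (97 + (PySem.Set.ofList p).length))]
          = ((PySem.Set.ofList p) ++ [i]).map (fun c => (c, patIdx (PySem.Set.ofList p ++ [i]) c))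
        rw [List.map_append]
        congr 1
        · exact (List.map_congr_left fun c hc => by rw [hsame c hc]).symm
        · simp [hnew]
      · simp only [List.map_append, List.map_cons, List.map_nil, hnew]
        congr 1
        exact (List.map_congr_left fun c hc => (hsame' c hc).symm)
      · show 97 + (PySem.Set.ofList p).length + 1 = 97 + (PySem.Set.ofList p ++ [i]).length
        simp only [List.length_append, List.length_cons, List.length_nil]
        omega

-- the index of c in the first-occurrence unique list equals the number of distinct
-- letters occurring strictly before c's first occurrence
lemma idx_eq_prefix_distinct (l : List Char) (c : Char) (hc : c ∈ l) :
    PySem.List.index? (PySem.Set.ofList l) c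
      = some (PySem.Set.ofList (l.take ((PySem.List.index? l c).getD 0))).length := by
  induction l using List.reverseRecOn with
  | nil => cases hc
  | append_singleton l i ih =>
    by_cases hcl : c ∈ l
    · -- appending i changes neither c's first occurrence nor its rank among uniques
      rw [PySem.List.index?_append_of_mem _ hcl]
      obtain ⟨k, hk⟩ := Option.isSome_iff_exists.1 ((PySem.List.index?_isSome_iff _ _).2 hcl)
      obtain ⟨hklt, -, -⟩ := PySem.List.getElem_of_index?_eq_some hk
      have htk : (l ++ [i]).take ((PySem.List.index? l c).getD 0) = l.take ((PySem.List.index? l c).getD 0) := by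
        rw [hk, Option.getD_some, List.take_append_of_le_length (le_of_lt hklt)]
      rw [htk, PySem.Set.ofList_append_singleton]
      by_cases hi : i ∈ PySem.Set.ofList l
      · rw [PySem.Set.add_of_mem hi]; exact ih hcl
      · rw [PySem.Set.add_of_not_mem hi,
            PySem.List.index?_append_of_mem _ ((PySem.Set.mem_ofList _ _).2 hcl)]
        exact ih hcl
    · -- c = i, first seen at position l.length: the prefix is exactly l
      have hci : c = i := by
        cases List.mem_append.1 hc with
        | inl h => exact absurd h hcl
        | inr h => simpa using h
      subst hci
      rw [PySem.List.index?_append_singleton_self _ _ hcl, Option.getD_some, List.take_left,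
          PySem.Set.ofList_append_singleton,
          PySem.Set.add_of_not_mem (fun h => hcl ((PySem.Set.mem_ofList _ _).1 h)),
          PySem.List.index?_append_singleton_self _ _ (fun h => hcl ((PySem.Set.mem_ofList _ _).1 h))]

-- ===== VERDICT (by name: the statement is the Claim_ definition above) =====
theorem paternify_spec : Claim_equal_paternify := by
  intro instr _
  unfold Spec_paternify paternify paternify_alt
  rw [foldA]
  congr 1
  refine List.map_congr_left fun c hc => ?_
  rw [PySem.List.slice_to_natCast]
  unfold patIdx
  rw [idx_eq_prefix_distinct _ c hc, Option.getD_some]
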